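-- pv_equiv track=rewrite | github.com/paiml/depyler | examples/hard_edge_nested_loops.py | triple_nested_sum
-- ===== SOURCE A (Python) =====
-- def triple_nested_sum(n: int) -> int:
--     """Sum i*j*k for all valid i,j,k with break conditions."""
--     total: int = 0
--     i: int = 1
--     while i <= n:
--         j: int = 1
--         while j <= n:
--             k: int = 1
--             while k <= n:
--                 product: int = i * j * k
--                 if product > 100:
--                     break
--                 total = total + product
--                 k = k + 1
--             j = j + 1
--         i = i + 1
--     return total
-- ===== SOURCE B (Python) =====
-- def triple_nested_sum(n: int) -> int:
--     """Sum i*j*k for all valid i,j,k with break conditions."""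
--     total = 0
--     for i in range(1, min(n, 100) + 1):
--         for j in range(1, min(n, 100 // i) + 1):
--             p = i * j
--             kmax = min(n, 100 // p)
--             total += p * kmax * (kmax + 1) // 2
--     return total
-- ===== Notes on version B (the rewrite author's own statement) =====
-- stated objective: faster
-- what changed: Replaced the triple while-loop (O(n^2) iterations even though products >100 contribute nothing) by iterating only the O(1) set of pairs (i,j) with i*j <= 100 and summing each k-run in closed form with the triangular-number formula, so the running time is independent of n.
import Mathlib
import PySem

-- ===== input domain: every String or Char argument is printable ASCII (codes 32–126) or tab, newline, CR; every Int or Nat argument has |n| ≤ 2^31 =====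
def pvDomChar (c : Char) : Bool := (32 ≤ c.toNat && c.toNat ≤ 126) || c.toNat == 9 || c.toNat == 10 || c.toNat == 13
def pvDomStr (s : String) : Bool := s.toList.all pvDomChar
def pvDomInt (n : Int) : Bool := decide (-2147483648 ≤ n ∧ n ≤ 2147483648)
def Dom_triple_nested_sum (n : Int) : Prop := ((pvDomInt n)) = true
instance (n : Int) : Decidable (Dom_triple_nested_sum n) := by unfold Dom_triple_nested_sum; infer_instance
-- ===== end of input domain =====

-- B replaces A's O(n^2) triple while-loop by iterating only the pairs (i,j) with
-- i*j <= 100 and summing each innermost k-run in closed form (objective: faster).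

-- ===== PORT A =====
-- innermost 'while k <= n' loop of A (break when i*j*k > 100)
def pvKLoop (n i j : Int) (k : Int) (total : Int) : Int :=
  if k ≤ n then
    let product := i * j * k
    if product > 100 then total
    else pvKLoop n i j (k + 1) (total + product)
  else total
termination_by (n + 1 - k).toNat
decreasing_by omega

-- middle 'while j <= n' loop of A
def pvJLoop (n i : Int) (j : Int) (total : Int) : Int :=
  if j ≤ n then pvJLoop n i (j + 1) (pvKLoop n i j 1 total)
  else total
termination_by (n + 1 - j).toNat
decreasing_by omega

-- outer 'while i <= n' loop of A
def pvILoop (n : Int) (i : Int) (total : Int) : Int :=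
  if i ≤ n then pvILoop n (i + 1) (pvJLoop n i 1 total)
  else total
termination_by (n + 1 - i).toNat
decreasing_by omega

def triple_nested_sum (n : Int) : Int := pvILoop n 1 0

-- ===== PORT B =====
def triple_nested_sum_alt (n : Int) : Int :=
  (PySem.List.pyRange 1 (min n 100 + 1) 1).foldl (fun total i =>
    (PySem.List.pyRange 1 (min n (PySem.Int.floordiv 100 i) + 1) 1).foldl (fun total j =>
      let p := i * j
      let kmax := min n (PySem.Int.floordiv 100 p)
      total + PySem.Int.floordiv (p * kmax * (kmax + 1)) 2) total) 0

-- ===== PRECONDITION & SPEC =====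
def Spec_triple_nested_sum (n : Int) (out : Int) : Prop := out = triple_nested_sum_alt n
instance (n : Int) (out : Int) : Decidable (Spec_triple_nested_sum n out) := by unfold Spec_triple_nested_sum; infer_instance

-- ===== CLAIM (what is proved, stated in full; the proofs are below) =====
def Claim_equal_triple_nested_sum : Prop := ∀ (n : Int), Dom_triple_nested_sum n → Spec_triple_nested_sum n (triple_nested_sum n)

-- ===== LEMMAS AND PROOFS =====

-- triangular number m*(m+1)/2
def pvTri (m : Int) : Int := m * (m + 1) / 2

-- total contribution of a fixed pair (i, j): i*j * (sum of the k accepted by A's inner loop)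
def pvC (n i j : Int) : Int := i * j * pvTri (min n (100 / (i * j)))

theorem pvTri_succ (m : Int) : pvTri m = pvTri (m - 1) + m := by
  unfold pvTri
  have h1 : (m - 1) * (m - 1 + 1) = (m - 1) * m := by ring
  have h2 : m * (m + 1) = (m - 1) * m + m * 2 := by ring
  rw [h1, h2, Int.add_mul_ediv_right _ _ (by norm_num : (2:Int) ≠ 0)]

theorem pvTri_zero : pvTri 0 = 0 := by decide

theorem pvKLoop_eq (n i j : Int) (hi : 1 ≤ i) (hj : 1 ≤ j) (k t : Int)
    (hk : 1 ≤ k) (hk2 : k ≤ min n (100 / (i * j)) + 1) :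
    pvKLoop n i j k t = t + i * j * (pvTri (min n (100 / (i * j))) - pvTri (k - 1)) := by
  have hp : 0 < i * j := by positivity
  set M := min n (100 / (i * j)) with hM
  generalize hd : (M + 1 - k).toNat = d
  induction d generalizing k t with
  | zero =>
    have hkM : k = M + 1 := by omega
    rw [pvKLoop]
    have hprod : k ≤ n → 100 < i * j * k := by
      intro hkn
      have hMlt : 100 / (i * j) < k := by omega
      have : ¬ (k ≤ 100 / (i * j)) := by omega
      rw [Int.le_ediv_iff_mul_le hp] at this
      push Not at this
      calc (100:Int) < k * (i * j) := this
        _ = i * j * k := by ring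
    by_cases hkn : k ≤ n
    · simp only [if_pos hkn, if_pos (hprod hkn)]
      rw [hkM]
      ring_nf
    · simp only [if_neg hkn]
      rw [hkM]
      ring_nf
  | succ d ih =>
    have hkM : k ≤ M := by omega
    have hkn : k ≤ n := by omega
    have hk100 : k ≤ 100 / (i * j) := by omega
    have hprod : ¬ (100 < i * j * k) := by
      rw [Int.le_ediv_iff_mul_le hp] at hk100
      push Not
      calc i * j * k = k * (i * j) := by ring
        _ ≤ 100 := hk100
    rw [pvKLoop]
    simp only [if_pos hkn, if_neg hprod]
    rw [ih (k + 1) (t + i * j * k) (by omega) (by omega) (by omega)]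
    have : pvTri (k + 1 - 1) = pvTri (k - 1) + k := by
      have h := pvTri_succ k
      simpa using h
    rw [this]
    ring

theorem pvKLoop_top (n i j : Int) (hi : 1 ≤ i) (hj : 1 ≤ j) (hn : 1 ≤ n) (t : Int) :
    pvKLoop n i j 1 t = t + pvC n i j := by
  have hM : 0 ≤ min n (100 / (i * j)) := by
    have : (0:Int) ≤ 100 / (i * j) := Int.ediv_nonneg (by norm_num) (by positivity)
    omega
  rw [pvKLoop_eq n i j hi hj 1 t (by omega) (by omega)]
  unfold pvC
  norm_num [pvTri_zero]

theorem pvJLoop_eq (n i : Int) (hi : 1 ≤ i) (j t : Int) (hj : 1 ≤ j) :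
    pvJLoop n i j t = t + ((PySem.List.pyRange j (n + 1) 1).map (pvC n i)).sum := by
  generalize hd : (n + 1 - j).toNat = d
  induction d generalizing j t with
  | zero =>
    have hjn : ¬ (j ≤ n) := by omega
    rw [pvJLoop]
    rw [if_neg hjn, PySem.List.pyRange_one_eq_nil (by omega)]
    simp
  | succ d ih =>
    have hjn : j ≤ n := by omega
    rw [pvJLoop, if_pos hjn]
    rw [ih (j + 1) _ (by omega) (by omega)]
    rw [pvKLoop_top n i j hi hj (by omega) t]
    rw [PySem.List.pyRange_one_cons (by omega : j < n + 1)]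
    simp only [List.map_cons, List.sum_cons]
    ring

theorem pvILoop_eq (n : Int) (i t : Int) (hi : 1 ≤ i) :
    pvILoop n i t = t + ((PySem.List.pyRange i (n + 1) 1).map
      (fun i => ((PySem.List.pyRange 1 (n + 1) 1).map (pvC n i)).sum)).sum := by
  generalize hd : (n + 1 - i).toNat = d
  induction d generalizing i t with
  | zero =>
    have hin : ¬ (i ≤ n) := by omega
    rw [pvILoop]
    rw [if_neg hin, PySem.List.pyRange_one_eq_nil (by omega : n + 1 ≤ i)]
    simp
  | succ d ih =>
    have hin : i ≤ n := by omega
    rw [pvILoop, if_pos hin]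
    rw [ih (i + 1) _ (by omega) (by omega)]
    rw [pvJLoop_eq n i hi 1 _ (by omega)]
    rw [PySem.List.pyRange_one_cons (by omega : i < n + 1)]
    simp only [List.map_cons, List.sum_cons]
    ring

-- the tail j > 100/i contributes nothing
theorem pvInner_trunc (n i : Int) (hi : 1 ≤ i) :
    ((PySem.List.pyRange 1 (n + 1) 1).map (pvC n i)).sum
      = ((PySem.List.pyRange 1 (min n (100 / i) + 1) 1).map (pvC n i)).sum := by
  by_cases hn : n ≤ 100 / i
  · rw [min_eq_left hn]
  · have h0 : (0:Int) ≤ 100 / i := Int.ediv_nonneg (by norm_num) (by omega)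
    rw [min_eq_right (by omega : 100 / i ≤ n)]
    rw [PySem.List.pyRange_one_append 1 (100 / i + 1) (n + 1) (by omega) (by omega)]
    rw [List.map_append, List.sum_append]
    have htail : ((PySem.List.pyRange (100 / i + 1) (n + 1) 1).map (pvC n i)).sum = 0 := by
      apply List.sum_eq_zero
      intro x hx
      rw [List.mem_map] at hx
      obtain ⟨j, hj, rfl⟩ := hx
      rw [PySem.List.mem_pyRange_one] at hj
      have hij : 100 < i * j := by
        have hle : ¬ (j ≤ 100 / i) := by omega
        rw [Int.le_ediv_iff_mul_le (by omega : (0:Int) < i)] at hle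
        push Not at hle
        calc (100:Int) < j * i := hle
          _ = i * j := by ring
      have hz : 100 / (i * j) = 0 := Int.ediv_eq_zero_of_lt (by norm_num) hij
      unfold pvC
      rw [hz, min_eq_right (by omega : (0:Int) ≤ n), pvTri_zero, mul_zero]
    rw [htail, add_zero]

-- B's closed-form summand equals pvC
theorem pvBody_eq (n i j : Int) (hi : 1 ≤ i) (hj : 1 ≤ j) :
    PySem.Int.floordiv (i * j * min n (PySem.Int.floordiv 100 (i * j))
      * (min n (PySem.Int.floordiv 100 (i * j)) + 1)) 2 = pvC n i j := by
  rw [PySem.Int.floordiv_eq_ediv_of_pos (by positivity : (0:Int) < i * j)]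
  rw [PySem.Int.floordiv_eq_ediv_of_pos (by norm_num : (0:Int) < 2)]
  set m := min n (100 / (i * j)) with hm
  obtain ⟨T, hT⟩ := Int.even_mul_succ_self m
  have h1 : i * j * m * (m + 1) = (i * j * T) * 2 := by rw [mul_assoc, hT]; ring
  have h2 : m * (m + 1) = T * 2 := by rw [hT]; ring
  rw [h1, Int.mul_ediv_cancel _ (by norm_num : (2:Int) ≠ 0)]
  unfold pvC pvTri
  rw [← hm, h2, Int.mul_ediv_cancel _ (by norm_num : (2:Int) ≠ 0)]

-- B's inner foldl as a sum of pvC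
theorem pvB_inner (n i : Int) (hi : 1 ≤ i) (l : List Int) (h : ∀ j ∈ l, 1 ≤ j) (t : Int) :
    l.foldl (fun total j =>
      let p := i * j
      let kmax := min n (PySem.Int.floordiv 100 p)
      total + PySem.Int.floordiv (p * kmax * (kmax + 1)) 2) t
    = t + (l.map (pvC n i)).sum := by
  induction l generalizing t with
  | nil => simp
  | cons j l ih =>
    simp only [List.foldl_cons, List.map_cons, List.sum_cons]
    rw [ih (fun x hx => h x (List.mem_cons_of_mem j hx))]
    rw [pvBody_eq n i j hi (h j (List.mem_cons_self))]
    ring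

-- B's outer foldl as a sum of inner sums
theorem pvB_outer (n : Int) (l : List Int) (h : ∀ i ∈ l, 1 ≤ i) (t : Int) :
    l.foldl (fun total i =>
      (PySem.List.pyRange 1 (min n (PySem.Int.floordiv 100 i) + 1) 1).foldl (fun total j =>
        let p := i * j
        let kmax := min n (PySem.Int.floordiv 100 p)
        total + PySem.Int.floordiv (p * kmax * (kmax + 1)) 2) total) t
    = t + (l.map (fun i =>
        ((PySem.List.pyRange 1 (min n (100 / i) + 1) 1).map (pvC n i)).sum)).sum := by
  induction l generalizing t with
  | nil => simp
  | cons i l ih =>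
    simp only [List.foldl_cons, List.map_cons, List.sum_cons]
    rw [ih (fun x hx => h x (List.mem_cons_of_mem i hx))]
    have hi : 1 ≤ i := h i List.mem_cons_self
    rw [pvB_inner n i hi _ (fun j hj => by
      rw [PySem.List.mem_pyRange_one] at hj; omega)]
    rw [PySem.Int.floordiv_eq_ediv_of_pos (by omega : (0:Int) < i)]
    ring

-- B's port, rewritten as a sum of pvC over the bounded ranges
theorem pvB_eq (n : Int) : triple_nested_sum_alt n
    = ((PySem.List.pyRange 1 (min n 100 + 1) 1).map
        (fun i => ((PySem.List.pyRange 1 (min n (100 / i) + 1) 1).map (pvC n i)).sum)).sum := by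
  unfold triple_nested_sum_alt
  rw [pvB_outer n _ (fun i hi => by rw [PySem.List.mem_pyRange_one] at hi; omega)]
  simp

-- the tail i > 100 contributes nothing
theorem pvOuter_trunc (n : Int) :
    ((PySem.List.pyRange 1 (n + 1) 1).map
        (fun i => ((PySem.List.pyRange 1 (min n (100 / i) + 1) 1).map (pvC n i)).sum)).sum
      = ((PySem.List.pyRange 1 (min n 100 + 1) 1).map
        (fun i => ((PySem.List.pyRange 1 (min n (100 / i) + 1) 1).map (pvC n i)).sum)).sum := by
  by_cases hn : n ≤ 100
  · rw [min_eq_left hn]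
  · rw [min_eq_right (by omega : (100:Int) ≤ n)]
    rw [PySem.List.pyRange_one_append 1 101 (n + 1) (by omega) (by omega)]
    rw [List.map_append, List.sum_append]
    have htail : ((PySem.List.pyRange 101 (n + 1) 1).map
        (fun i => ((PySem.List.pyRange 1 (min n (100 / i) + 1) 1).map (pvC n i)).sum)).sum = 0 := by
      apply List.sum_eq_zero
      intro x hx
      rw [List.mem_map] at hx
      obtain ⟨i, hi, rfl⟩ := hx
      rw [PySem.List.mem_pyRange_one] at hi
      have hz : 100 / i = 0 := Int.ediv_eq_zero_of_lt (by norm_num) (by omega)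
      rw [hz, min_eq_right (by omega : (0:Int) ≤ n)]
      rw [show (0:Int) + 1 = 1 by norm_num, PySem.List.pyRange_one_eq_nil (le_refl 1)]
      simp
    rw [htail, add_zero]
    norm_num

-- ===== VERDICT (by name: the statement is the Claim_ definition above) =====
theorem triple_nested_sum_spec : Claim_equal_triple_nested_sum := by
  intro n _
  unfold Spec_triple_nested_sum
  unfold triple_nested_sum
  rw [pvILoop_eq n 1 0 (by omega), pvB_eq, ← pvOuter_trunc]
  simp only [zero_add]
  exact congrArg List.sum (List.map_congr_left (fun i hi => by
    rw [PySem.List.mem_pyRange_one] at hi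
    exact pvInner_trunc n i (by omega)))
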